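-- pv_equiv track=rewrite | github.com/PyPippo/PlexRenamer | src/core/_utility.py | check_for_duplicate_names
-- ===== SOURCE A (Python) =====
-- def check_for_duplicate_names(new_names: list[str]) -> dict[str, list[int]]:
--     """Check for duplicate names in a list.
--
--     Identifies all filenames that appear more than once in the input list
--     and returns their indices. Useful for detecting rename conflicts before
--     executing file operations.
--
--     Args:
--         new_names: List of proposed new filenames (with or without extensions)
--
--     Returns:
--         dict: Mapping of duplicate name to list of indices where it appears.
--               Only includes names that appear more than once.
--               Example: {'Movie (2023).mkv': [0, 3]} indicates indices 0 and 3
--                       both have the same proposed name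
--     """
--     name_indices: dict[str, list[int]] = {}
--
--     for idx, name in enumerate(new_names):
--         if name in name_indices:
--             name_indices[name].append(idx)
--         else:
--             name_indices[name] = [idx]
--
--     # Return only duplicates (names that appear more than once)
--     return {name: indices for name, indices in name_indices.items() if len(indices) > 1}
-- ===== SOURCE B (Python) =====
-- def check_for_duplicate_names(new_names: list[str]) -> dict[str, list[int]]:
--     """Two-pass: count every name first, then collect indices only for duplicated names."""
--     counts: dict[str, int] = {}
--     for name in new_names:
--         counts[name] = counts.get(name, 0) + 1
--     duplicates: dict[str, list[int]] = {}
--     for idx, name in enumerate(new_names):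
--         if counts[name] > 1:
--             duplicates.setdefault(name, []).append(idx)
--     return duplicates
-- ===== Notes on version B (the rewrite author's own statement) =====
-- stated objective: alternative
-- what changed: Instead of grouping all indices per name and then filtering out singletons, B first counts occurrences in one pass and then collects indices in a second pass only for names whose count exceeds 1 (setdefault-append), never materialising singleton groups.
import Mathlib
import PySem

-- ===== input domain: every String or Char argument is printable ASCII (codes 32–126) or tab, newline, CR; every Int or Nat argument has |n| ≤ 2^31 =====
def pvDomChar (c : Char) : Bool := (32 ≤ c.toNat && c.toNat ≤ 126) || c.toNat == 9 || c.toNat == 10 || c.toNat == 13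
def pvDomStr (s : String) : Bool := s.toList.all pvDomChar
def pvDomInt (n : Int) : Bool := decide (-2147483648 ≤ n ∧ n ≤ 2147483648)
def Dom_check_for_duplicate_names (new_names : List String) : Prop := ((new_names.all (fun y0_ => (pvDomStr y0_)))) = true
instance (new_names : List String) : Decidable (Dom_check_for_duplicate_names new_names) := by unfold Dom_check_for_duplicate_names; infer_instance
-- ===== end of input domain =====

-- B replaces A's group-all-then-filter pass by a count pass followed by a collect pass that
-- only ever creates entries for duplicated names; return values are proved identical.

-- ===== PORT A =====
-- grouping loop: append idx if the name is already a key, else create the key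
def check_for_duplicate_names (new_names : List String) : List (String × List Int) :=
  -- name_indices: the grouping loop; then the comprehension
  -- {name: indices for name, indices in name_indices.items() if len(indices) > 1}
  ((PySem.List.enumerate new_names).foldl
      (fun d p =>
        if d.contains p.2 then d.modify p.2 [] (fun l => l ++ [p.1])
        else d.insert p.2 [p.1])
      PySem.Dict.empty).items.filter (fun q => decide (1 < q.2.length))

-- ===== PORT B =====
-- pass 1: counts[name] = counts.get(name, 0) + 1; pass 2: setdefault(name, []).append(idx)
-- (= modify name [] (· ++ [idx])) guarded by counts[name] > 1
def check_for_duplicate_names_alt (new_names : List String) : List (String × List Int) :=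
  -- 'counts' inlined at its single use; 'duplicates' is the guarded collect loop
  ((PySem.List.enumerate new_names).foldl
      (fun d p =>
        if 1 < (new_names.foldl (fun d name => d.insert name (d.getD name 0 + 1))
            (PySem.Dict.empty : PySem.Dict String Int)).getD p.2 0 then
          d.modify p.2 [] (fun l => l ++ [p.1])
        else d)
      PySem.Dict.empty).items

-- ===== PRECONDITION & SPEC =====
def Spec_check_for_duplicate_names (new_names : List String) (out : List (String × List Int)) : Prop := out = check_for_duplicate_names_alt new_names
instance (new_names : List String) (out : List (String × List Int)) : Decidable (Spec_check_for_duplicate_names new_names out) := by unfold Spec_check_for_duplicate_names; infer_instance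

-- ===== CLAIM (what is proved, stated in full; the proofs are below) =====
def Claim_equal_check_for_duplicate_names : Prop := ∀ (new_names : List String), Dom_check_for_duplicate_names new_names → Spec_check_for_duplicate_names new_names (check_for_duplicate_names new_names)

-- ===== LEMMAS AND PROOFS =====

-- A's branching step is exactly the unconditional 'modify with append' step
theorem stepA_eq_modify (d : PySem.Dict String (List Int)) (p : Int × String) :
    (if d.contains p.2 then d.modify p.2 [] (fun l => l ++ [p.1])
     else d.insert p.2 [p.1]) = d.modify p.2 [] (fun l => l ++ [p.1]) := by
  by_cases h : d.contains p.2 = true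
  · simp [h]
  · simp only [Bool.not_eq_true] at h
    simp [h, PySem.Dict.modify, PySem.Dict.getD_of_not_contains d [] h]

-- items of the modify-append grouping fold over any pair list: one entry per distinct key
-- (first-appearance order), carrying all its values in order
theorem items_group_fold (l : List (Int × String)) :
    (l.foldl (fun d p => d.modify p.2 [] (fun acc => acc ++ [p.1])) PySem.Dict.empty).items =
      (PySem.Set.ofList (l.map (fun p => p.2))).map (fun k =>
        (k, ((l.map Prod.swap).filter (fun r => r.1 == k)).map (fun r => r.2))) := by
  set d := l.foldl (fun d p => d.modify p.2 [] (fun acc => acc ++ [p.1])) PySem.Dict.empty with hd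
  have hnodup : d.keys.Nodup :=
    PySem.Dict.nodup_keys_foldl_modify_key _ _ _ _ _ PySem.Dict.nodup_keys_empty
  have hkeys : d.keys = PySem.Set.ofList (l.map (fun p => p.2)) := by
    rw [hd, PySem.Dict.keys_foldl_modify_key]
    simp [PySem.Set.update_nil_left]
  have hgetD : ∀ k, d.getD k [] =
      ((l.map Prod.swap).filter (fun r => r.1 == k)).map (fun r => r.2) := by
    intro k
    have h2 : d = (l.map Prod.swap).foldl
        (fun d r => d.modify r.1 [] (fun acc => acc ++ [r.2])) PySem.Dict.empty := by
      rw [hd, List.foldl_map]; rfl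
    rw [h2, PySem.Dict.getD_foldl_modify_append]
    simp
  rw [PySem.Dict.items_eq_map_keys d hnodup [], hkeys]
  exact List.map_congr_left (fun k _ => by rw [hgetD])

-- Set.contains ignores a filter whose predicate holds at the queried element
theorem contains_filter_of {α : Type} [BEq α] [LawfulBEq α] (q : α → Bool) (s : List α)
    (x : α) (hx : q x = true) :
    PySem.Set.contains (s.filter q) x = PySem.Set.contains s x := by
  simp [PySem.Set.contains]
  exact fun _ => hx

-- building a set from a filtered list = filtering the set (first occurrences survive)
theorem foldl_add_filter {α : Type} [BEq α] [LawfulBEq α] (q : α → Bool) (l : List α) :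
    ∀ s : List α, (l.filter q).foldl PySem.Set.add (s.filter q) =
      (l.foldl PySem.Set.add s).filter q := by
  induction l with
  | nil => intro s; rfl
  | cons a t ih =>
    intro s
    by_cases hq : q a = true
    · have ha : PySem.Set.add (s.filter q) a = (PySem.Set.add s a).filter q := by
        unfold PySem.Set.add
        rw [contains_filter_of q s a hq]
        by_cases hc : a ∈ s <;>
          simp [PySem.Set.contains, hc, List.filter_append, hq]
      simp only [List.filter_cons, hq, if_pos, List.foldl_cons]
      rw [ha, ih (PySem.Set.add s a)]
    · simp only [Bool.not_eq_true] at hq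
      have ha : (PySem.Set.add s a).filter q = s.filter q := by
        unfold PySem.Set.add
        by_cases hc : a ∈ s <;>
          simp [PySem.Set.contains, hc, List.filter_append, hq]
      simp only [List.filter_cons, hq, Bool.false_eq_true, if_false]
      rw [← ha, ih (PySem.Set.add s a)]
      rfl

theorem ofList_filter {α : Type} [BEq α] [LawfulBEq α] (q : α → Bool) (l : List α) :
    PySem.Set.ofList (l.filter q) = (PySem.Set.ofList l).filter q := by
  have h := foldl_add_filter q l []
  simpa [PySem.Set.ofList, PySem.Set.empty] using h

-- ===== VERDICT =====
theorem check_for_duplicate_names_spec : Claim_equal_check_for_duplicate_names := by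
  intro ns _
  unfold Spec_check_for_duplicate_names check_for_duplicate_names check_for_duplicate_names_alt
  show ((PySem.List.enumerate ns).foldl
      (fun d p =>
        if d.contains p.2 then d.modify p.2 [] (fun l => l ++ [p.1])
        else d.insert p.2 [p.1]) PySem.Dict.empty).items.filter (fun q => decide (1 < q.2.length))
    = ((PySem.List.enumerate ns).foldl
      (fun d p =>
        if 1 < (ns.foldl (fun d name => d.insert name (d.getD name 0 + 1))
            (PySem.Dict.empty : PySem.Dict String Int)).getD p.2 0 then
          d.modify p.2 [] (fun l => l ++ [p.1]) else d) PySem.Dict.empty).items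
  -- abbreviations
  set E := PySem.List.enumerate ns with hE
  set F : String → List Int :=
    fun k => ((E.map Prod.swap).filter (fun r => r.1 == k)).map (fun r => r.2) with hF
  set qB : String → Bool := fun n => decide (1 < (ns.count n : Int)) with hqB
  -- each group's length is the name's multiplicity
  have hlen : ∀ k, (F k).length = ns.count k := by
    intro k
    rw [hF]
    simp only [List.length_map, ← List.countP_eq_length_filter, List.countP_map,
      List.count_eq_countP]
    rw [← PySem.List.map_snd_enumerate ns 0, List.countP_map]
    rfl
  -- ===== A's side =====
  have hA : ((E.foldl (fun d p =>
        if d.contains p.2 then d.modify p.2 [] (fun l => l ++ [p.1])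
        else d.insert p.2 [p.1]) PySem.Dict.empty).items.filter
          (fun q => decide (1 < q.2.length)))
      = ((PySem.Set.ofList ns).filter qB).map (fun k => (k, F k)) := by
    rw [PySem.List.foldl_congr_mem E _ _ _ (fun d p _ => stepA_eq_modify d p),
      items_group_fold E]
    rw [hE, PySem.List.map_snd_enumerate ns 0]
    rw [List.filter_map]
    refine congrArg _ (List.filter_congr ?_)
    intro k _
    show decide (1 < (F k).length) = qB k
    rw [hlen k, hqB]
    simp
  -- ===== B's side =====
  have hcnt : (ns.foldl (fun d name => d.insert name (d.getD name 0 + 1))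
      (PySem.Dict.empty : PySem.Dict String Int)) = PySem.Dict.counter ns :=
    PySem.Dict.foldl_insert_getD_add_one_eq_counter ns
  have hstepB : ∀ (d : PySem.Dict String (List Int)) (p : Int × String),
      (if 1 < (ns.foldl (fun d name => d.insert name (d.getD name 0 + 1))
          (PySem.Dict.empty : PySem.Dict String Int)).getD p.2 0 then
        d.modify p.2 [] (fun l => l ++ [p.1]) else d)
      = (if qB p.2 = true then d.modify p.2 [] (fun l => l ++ [p.1]) else d) := by
    intro d p
    rw [hcnt, PySem.Dict.getD_counter, hqB]
    simp
  have hB : ((E.foldl (fun d p =>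
        if 1 < (ns.foldl (fun d name => d.insert name (d.getD name 0 + 1))
            (PySem.Dict.empty : PySem.Dict String Int)).getD p.2 0 then
          d.modify p.2 [] (fun l => l ++ [p.1]) else d) PySem.Dict.empty).items)
      = ((PySem.Set.ofList ns).filter qB).map (fun k => (k, F k)) := by
    rw [PySem.List.foldl_congr_mem E _ _ _ (fun d p _ => hstepB d p), ← List.foldl_filter,
      items_group_fold (E.filter (fun p => qB p.2))]
    -- keys: filtered-set form
    have hkeys : (E.filter (fun p => qB p.2)).map (fun p => p.2) = ns.filter qB := by
      have := List.filter_map (f := fun p : Int × String => p.2) (p := qB) (l := E)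
      rw [hE] at this ⊢
      rw [PySem.List.map_snd_enumerate ns 0] at this
      simp only [Function.comp_def] at this
      exact this.symm
    rw [hkeys, ofList_filter]
    -- values: the guard filter is redundant inside a key's group
    refine List.map_congr_left ?_
    intro k hk
    have hqk : qB k = true := (List.mem_filter.mp hk).2
    have hswap : (E.filter (fun p => qB p.2)).map Prod.swap
        = (E.map Prod.swap).filter (fun r => qB r.1) := by
      have := List.filter_map (f := Prod.swap (α := Int) (β := String))
        (p := fun r : String × Int => qB r.1) (l := E)
      simp only [Function.comp_def, Prod.fst_swap] at this
      exact this.symm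
    rw [hswap, List.filter_filter]
    have : ∀ r : String × Int, ((r.1 == k) && qB r.1) = (r.1 == k) := by
      intro r
      by_cases h : r.1 == k
      · have : r.1 = k := by simpa using h
        simp [this, hqk]
      · simp [h]
    rw [List.filter_congr (fun r _ => this r), hF]
  rw [hA, hB]
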